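-- pv_equiv track=rewrite | github.com/zalmane/ttyd | ask.py | _extract_new_entities
-- ===== SOURCE A (Python) =====
-- def _extract_new_entities(entities_text: str, orig_ids: set[str]) -> list[str]:
--     """Extract lines belonging to entities not in orig_ids."""
--     lines = entities_text.split("\n")
--     result = []
--     in_new = False
--     depth = 0
--     for line in lines:
--         stripped = line.strip()
--         if stripped.startswith("ent "):
--             ent_id = stripped.split()[1]
--             in_new = ent_id not in orig_ids
--             depth = 0
--         if in_new:
--             result.append(line)
--             depth += stripped.count("{") - stripped.count("}")
--             if depth <= 0 and "{" in stripped or stripped == "}":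
--                 if depth <= 0:
--                     in_new = False
--     return result
-- ===== SOURCE B (Python) =====
-- def _extract_new_entities(entities_text: str, orig_ids: set) -> list[str]:
--     """Extract lines belonging to entities not in orig_ids.
--
--     Two passes: first segment the text into entity blocks (independently of
--     orig_ids), then keep the blocks whose id is not in orig_ids.
--     """
--     # Pass 1: segment into (ent_id, lines) blocks.
--     blocks = []
--     current = None  # open block: (ent_id, lines)
--     depth = 0
--     for line in entities_text.split("\n"):
--         stripped = line.strip()
--         if stripped.startswith("ent "):
--             if current is not None:
--                 blocks.append(current)
--             current = (stripped.split()[1], [])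
--             depth = 0
--         if current is not None:
--             current[1].append(line)
--             depth += stripped.count("{") - stripped.count("}")
--             if depth <= 0 and ("{" in stripped or stripped == "}"):
--                 blocks.append(current)
--                 current = None
--     if current is not None:
--         blocks.append(current)
--     # Pass 2: keep the new blocks.
--     return [line for ent_id, lines in blocks if ent_id not in orig_ids
--             for line in lines]
-- ===== Notes on version B (the rewrite author's own statement) =====
-- stated objective: alternative
-- what changed: B replaces A's one-pass in_new/depth state machine by a two-pass decomposition: first segment the text into (id, lines) entity blocks independently of orig_ids, then filter the blocks by id and concatenate; the membership test moves out of the line loop entirely.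
import Mathlib
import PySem

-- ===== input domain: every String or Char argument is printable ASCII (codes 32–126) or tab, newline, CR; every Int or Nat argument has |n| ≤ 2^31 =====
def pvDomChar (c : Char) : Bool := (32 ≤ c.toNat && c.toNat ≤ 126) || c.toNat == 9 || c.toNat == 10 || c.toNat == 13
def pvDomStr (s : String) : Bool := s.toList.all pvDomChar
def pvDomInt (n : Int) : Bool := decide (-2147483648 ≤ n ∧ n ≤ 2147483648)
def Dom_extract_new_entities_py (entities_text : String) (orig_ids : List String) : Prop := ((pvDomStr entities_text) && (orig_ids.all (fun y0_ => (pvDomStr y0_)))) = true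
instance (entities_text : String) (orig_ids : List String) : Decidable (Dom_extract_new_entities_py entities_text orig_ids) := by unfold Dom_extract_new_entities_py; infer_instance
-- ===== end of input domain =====

-- B segments the text into entity blocks first (independently of orig_ids) and then
-- filters the blocks; same return value as A's one-pass state machine (objective: alternative decomposition).

-- ===== PORT A =====
-- one loop step of A; state = (result, in_new, depth)
def pvStepA (orig_ids : List String) (st : List String × Bool × Int) (line : String) :
    List String × Bool × Int :=
  let stripped := PySem.Str.strip line
  let st1 : Bool × Int :=
    if PySem.Str.startswith stripped "ent " then
      -- ent_id = stripped.split()[1]; pyGet? = none is Python's IndexError (unreachable: a stripped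
      -- line starting with "ent " always has a second token, so the .getD fallback never fires)
      let ent_id := (PySem.List.pyGet? (PySem.Str.split₀ stripped) 1).getD ""
      (!(orig_ids.contains ent_id), 0)
    else (st.2.1, st.2.2)
  if st1.1 then
    let result := st.1 ++ [line]
    let depth : Int := st1.2 + (PySem.Str.count stripped "{" : Int) - (PySem.Str.count stripped "}" : Int)
    let in_new : Bool :=
      if (depth ≤ 0 ∧ PySem.Str.isIn "{" stripped = true) ∨ stripped = "}" then
        (if depth ≤ 0 then false else st1.1)
      else st1.1
    (result, in_new, depth)
  else (st.1, st1.1, st1.2)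

def extract_new_entities_py (entities_text : String) (orig_ids : List String) : List String :=
  (((PySem.Str.split? entities_text "\n").getD []).foldl (pvStepA orig_ids) ([], false, 0)).1

-- ===== PORT B =====
-- one segmentation step of B; state = (blocks, current open block, depth); no orig_ids here
def pvStepB (st : List (String × List String) × Option (String × List String) × Int)
    (line : String) : List (String × List String) × Option (String × List String) × Int :=
  let stripped := PySem.Str.strip line
  let st1 : List (String × List String) × Option (String × List String) × Int :=
    if PySem.Str.startswith stripped "ent " then
      let blocks := match st.2.1 with
        | some c => st.1 ++ [c]
        | none => st.1
      (blocks, some ((PySem.List.pyGet? (PySem.Str.split₀ stripped) 1).getD "", []), 0)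
    else st
  match st1.2.1 with
  | none => st1
  | some c =>
    let ls := c.2 ++ [line]
    let depth : Int := st1.2.2 + (PySem.Str.count stripped "{" : Int) - (PySem.Str.count stripped "}" : Int)
    if depth ≤ 0 ∧ (PySem.Str.isIn "{" stripped = true ∨ stripped = "}") then
      (st1.1 ++ [(c.1, ls)], none, depth)
    else (st1.1, some (c.1, ls), depth)

def extract_new_entities_py_alt (entities_text : String) (orig_ids : List String) : List String :=
  let fin := ((PySem.Str.split? entities_text "\n").getD []).foldl pvStepB ([], none, 0)
  let blocks := match fin.2.1 with
    | some c => fin.1 ++ [c]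
    | none => fin.1
  (blocks.filter (fun b => !(orig_ids.contains b.1))).flatMap (fun b => b.2)

-- ===== PRECONDITION & SPEC =====
-- A is total: a stripped line has no trailing whitespace, so if it starts with "ent " it has
-- a second whitespace-separated token and stripped.split()[1] never raises. No Pre_ needed.
def Spec_extract_new_entities_py (entities_text : String) (orig_ids : List String) (out : List String) : Prop := out = extract_new_entities_py_alt entities_text orig_ids
instance (entities_text : String) (orig_ids : List String) (out : List String) : Decidable (Spec_extract_new_entities_py entities_text orig_ids out) := by unfold Spec_extract_new_entities_py; infer_instance

-- ===== CLAIM (what is proved, stated in full; the proofs are below) =====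
def Claim_equal_extract_new_entities_py : Prop := ∀ (entities_text : String) (orig_ids : List String), Dom_extract_new_entities_py entities_text orig_ids → Spec_extract_new_entities_py entities_text orig_ids (extract_new_entities_py entities_text orig_ids)

-- ===== LEMMAS AND PROOFS =====

-- output read off a B-state: closed blocks plus the open one, filtered and flattened
def pvOutB (orig_ids : List String) (st : List (String × List String) × Option (String × List String) × Int) : List String :=
  let blocks := match st.2.1 with
    | some c => st.1 ++ [c]
    | none => st.1
  (blocks.filter (fun b => !(orig_ids.contains b.1))).flatMap (fun b => b.2)

-- the simulation relation between A's state and B's state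
def pvRel (orig_ids : List String) (a : List String × Bool × Int)
    (b : List (String × List String) × Option (String × List String) × Int) : Prop :=
  a.1 = pvOutB orig_ids b ∧
  (match b.2.1 with
   | none => a.2.1 = false
   | some c => if orig_ids.contains c.1 then a.2.1 = false else (a.2.1 = true ∧ a.2.2 = b.2.2))

set_option maxHeartbeats 1000000 in
theorem pvRel_step (orig_ids : List String) (a : List String × Bool × Int)
    (b : List (String × List String) × Option (String × List String) × Int) (line : String)
    (h : pvRel orig_ids a b) : pvRel orig_ids (pvStepA orig_ids a line) (pvStepB b line) := by
  obtain ⟨h1, h2⟩ := h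
  obtain ⟨ra, ia, da⟩ := a
  obtain ⟨bs, cur, db⟩ := b
  simp only [pvRel, pvOutB, pvStepA, pvStepB] at *
  generalize PySem.Str.strip line = s
  generalize ((PySem.List.pyGet? (PySem.Str.split₀ s) 1).getD "") = eid
  generalize hc1 : (PySem.Str.count s "{" : Int) = c1
  generalize hc2 : (PySem.Str.count s "}" : Int) = c2
  by_cases hh : PySem.Str.startswith s "ent " = true <;>
    by_cases hbr : PySem.Str.isIn "{" s = true <;>
    by_cases heq : s = "}"
  all_goals cases cur with
    | none =>
      try by_cases hk : eid ∈ orig_ids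
      all_goals simp_all [List.filter_append, List.flatMap_append]
      all_goals try split_ifs
      all_goals simp_all [List.filter_append, List.flatMap_append]
    | some c =>
      obtain ⟨cid, cls⟩ := c
      try by_cases hk : eid ∈ orig_ids
      all_goals by_cases hk2 : cid ∈ orig_ids
      all_goals simp_all [List.filter_append, List.flatMap_append]
      all_goals try split_ifs
      all_goals simp_all [List.filter_append, List.flatMap_append]

set_option maxHeartbeats 1000000 in
theorem pvRel_foldl (orig_ids : List String) (lines : List String)
    (a : List String × Bool × Int)
    (b : List (String × List String) × Option (String × List String) × Int)
    (h : pvRel orig_ids a b) :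
    (lines.foldl (pvStepA orig_ids) a).1 = pvOutB orig_ids (lines.foldl pvStepB b) := by
  induction lines generalizing a b with
  | nil => exact h.1
  | cons l t ih => exact ih _ _ (pvRel_step orig_ids a b l h)

-- ===== VERDICT (by name: the statement is the Claim_ definition above) =====
theorem extract_new_entities_py_spec : Claim_equal_extract_new_entities_py := by
  intro text orig _
  unfold Spec_extract_new_entities_py extract_new_entities_py extract_new_entities_py_alt
  exact pvRel_foldl orig _ ([], false, 0) ([], none, 0) ⟨rfl, rfl⟩
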